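-- pv_equiv track=rewrite | github.com/TcheloBorgas/Fiap-ADS | Python/CP 2 SEMESTRE/CP2.py | faturamento
-- ===== SOURCE A (Python) =====
-- def faturamento(data):
--     gross_dc, gross_marvel = 0, 0
--     for row in data[1:]:
--         if row[2] == "DC":
--             gross_dc += int(row[10])
--         elif row[2] == "Marvel":
--             gross_marvel += int(row[10])
--     return gross_dc, gross_marvel, "DC" if gross_dc > gross_marvel else "Marvel"
-- ===== SOURCE B (Python) =====
-- def faturamento(data):
--     rows = data[1:]
--     gross_dc = sum(int(row[10]) for row in rows if row[2] == "DC")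
--     gross_marvel = sum(int(row[10]) for row in rows if row[2] == "Marvel")
--     return gross_dc, gross_marvel, "DC" if gross_dc > gross_marvel else "Marvel"
-- ===== Notes on version B (the rewrite author's own statement) =====
-- stated objective: alternative
-- what changed: Replaces the single combined scan with branching accumulators by two independent filtered-sum passes (one per studio), keeping the identical strict-> tiebreak.
import Mathlib
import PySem

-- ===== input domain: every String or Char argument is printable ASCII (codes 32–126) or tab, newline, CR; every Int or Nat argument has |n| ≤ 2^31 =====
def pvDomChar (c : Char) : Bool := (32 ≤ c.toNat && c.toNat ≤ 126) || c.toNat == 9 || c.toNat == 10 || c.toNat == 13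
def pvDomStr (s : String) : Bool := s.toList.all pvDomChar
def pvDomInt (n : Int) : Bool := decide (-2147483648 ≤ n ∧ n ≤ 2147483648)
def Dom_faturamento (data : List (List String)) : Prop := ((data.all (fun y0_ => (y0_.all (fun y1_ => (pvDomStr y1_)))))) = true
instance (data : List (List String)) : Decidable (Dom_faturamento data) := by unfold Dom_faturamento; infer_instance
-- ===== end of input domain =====

-- B replaces A's single combined scan by two independent filtered-sum passes (one per studio); same outputs.

-- ===== PORT A =====
-- int(row[10]) : none exactly where Python raises (IndexError / ValueError)
def pvGross (row : List String) : Option Int :=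
  (PySem.List.pyGet? row 10).bind PySem.Int.ofStr?

-- one iteration of A's loop body; none once an exception has occurred
def faturamentoStep (st : Option (Int × Int)) (row : List String) : Option (Int × Int) :=
  st.bind fun p =>
    match PySem.List.pyGet? row 2 with
    | none => none
    | some s =>
      if s = "DC" then (pvGross row).map (fun v => (p.1 + v, p.2))
      else if s = "Marvel" then (pvGross row).map (fun v => (p.1, p.2 + v))
      else some p

def faturamento (data : List (List String)) : Int × Int × String :=
  match (data.drop 1).foldl faturamentoStep (some (0, 0)) with
  | some (dc, mv) => (dc, mv, if dc > mv then "DC" else "Marvel")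
  | none => (0, 0, "Marvel")   -- unreachable under Pre_ (Python raises there)

-- ===== PORT B =====
-- one iteration of B's filtered sum for a fixed studio
def sumStep (studio : String) (st : Option Int) (row : List String) : Option Int :=
  st.bind fun s =>
    match PySem.List.pyGet? row 2 with
    | none => none
    | some t => if t = studio then (pvGross row).map (fun v => s + v) else some s

-- sum(int(row[10]) for row in rows if row[2] == studio)
def sumBy (rows : List (List String)) (studio : String) : Option Int :=
  rows.foldl (sumStep studio) (some 0)

def faturamento_alt (data : List (List String)) : Int × Int × String :=
  let rows := data.drop 1
  match sumBy rows "DC", sumBy rows "Marvel" with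
  | some dc, some mv => (dc, mv, if dc > mv then "DC" else "Marvel")
  | _, _ => (0, 0, "Marvel")   -- unreachable under Pre_

-- ===== PRECONDITION & SPEC =====
-- Pre_ excludes exactly the inputs where Python A raises: a row (after the header) lacking
-- index 2, or a DC/Marvel row whose row[10] is missing or not int()-parseable.
def okRow (row : List String) : Bool :=
  match PySem.List.pyGet? row 2 with
  | none => false
  | some s => !(s == "DC" || s == "Marvel") || ((PySem.List.pyGet? row 10).bind PySem.Int.ofStr?).isSome

def Pre_faturamento (data : List (List String)) : Prop :=
  ∀ row ∈ data.drop 1, okRow row = true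

instance (data : List (List String)) : Decidable (Pre_faturamento data) := by
  unfold Pre_faturamento; infer_instance

def pvWitness_faturamento : List (List String) :=
  [["header"], ["a", "b", "DC", "", "", "", "", "", "", "", "7"],
   ["a", "b", "Marvel", "", "", "", "", "", "", "", "3"], ["a", "b", "Other"]]

def Spec_faturamento (data : List (List String)) (out : Int × Int × String) : Prop := out = faturamento_alt data
instance (data : List (List String)) (out : Int × Int × String) : Decidable (Spec_faturamento data out) := by unfold Spec_faturamento; infer_instance

-- ===== CLAIM (what is proved, stated in full; the proofs are below) =====
def Claim_equal_faturamento : Prop := ∀ (data : List (List String)), Dom_faturamento data → Pre_faturamento data → Spec_faturamento data (faturamento data)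

-- ===== LEMMAS AND PROOFS =====

theorem sumStep_none (studio : String) (rows : List (List String)) :
    rows.foldl (sumStep studio) none = none := by
  induction rows with
  | nil => rfl
  | cons r rs ih => simpa [sumStep] using ih

theorem sumStep_shift (studio : String) (rows : List (List String)) (a : Int) :
    rows.foldl (sumStep studio) (some a)
      = (rows.foldl (sumStep studio) (some 0)).map (fun x => a + x) := by
  induction rows generalizing a with
  | nil => simp
  | cons r rs ih =>
    simp only [List.foldl_cons]
    by_cases h2 : ∃ s, PySem.List.pyGet? r 2 = some s
    · obtain ⟨s, hs⟩ := h2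
      by_cases hst : s = studio
      · cases hv : (pvGross r) with
        | none => simp [sumStep, hs, hst, hv, sumStep_none]
        | some v =>
          simp only [sumStep, hs, hst, hv, Option.bind_some, Option.map_some, if_true]
          rw [ih (a + v), ih (0 + v)]
          cases rs.foldl (sumStep studio) (some 0) with
          | none => simp
          | some x => simp only [Option.map_some]; congr 1; ring
      · simp only [sumStep, hs, Option.bind_some, if_neg hst]
        exact ih a
    · have : PySem.List.pyGet? r 2 = none := by
        cases h : PySem.List.pyGet? r 2
        · rfl
        · exact absurd ⟨_, h⟩ h2
      simp [sumStep, this, sumStep_none]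

theorem main_invariant (rows : List (List String)) (h : ∀ r ∈ rows, okRow r = true)
    (dc mv : Int) :
    ∃ d m, rows.foldl faturamentoStep (some (dc, mv)) = some (dc + d, mv + m) ∧
      sumBy rows "DC" = some d ∧ sumBy rows "Marvel" = some m := by
  induction rows generalizing dc mv with
  | nil => exact ⟨0, 0, by simp, rfl, rfl⟩
  | cons r rs ih =>
    have hok := h r (by simp)
    have hrs : ∀ r ∈ rs, okRow r = true := fun x hx => h x (by simp [hx])
    cases hs : PySem.List.pyGet? r 2 with
    | none => simp [okRow, hs] at hok
    | some s =>
      by_cases hdc : s = "DC"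
      · have hv : ∃ v, pvGross r = some v := by
          have := hok
          simp [okRow, hs, hdc, Option.isSome_iff_exists] at this
          exact this.imp fun v hv => by simpa [pvGross] using hv
        obtain ⟨v, hv⟩ := hv
        obtain ⟨d, m, hA, hD, hM⟩ := ih hrs (dc + v) mv
        refine ⟨v + d, m, ?_, ?_, ?_⟩
        · simpa [faturamentoStep, hs, hdc, hv, add_assoc] using hA
        · show (r :: rs).foldl (sumStep "DC") (some 0) = some (v + d)
          simp only [List.foldl_cons, sumStep, hs, hdc, Option.bind_some, hv,
            Option.map_some, if_true]
          rw [sumStep_shift]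
          simp only [sumBy] at hD
          rw [hD]; simp [add_comm]
        · show (r :: rs).foldl (sumStep "Marvel") (some 0) = some m
          simpa [sumStep, hs, hdc] using hM
      · by_cases hmv : s = "Marvel"
        · have hv : ∃ v, pvGross r = some v := by
            have := hok
            simp [okRow, hs, hmv, Option.isSome_iff_exists] at this
            exact this.imp fun v hv => by simpa [pvGross] using hv
          obtain ⟨v, hv⟩ := hv
          obtain ⟨d, m, hA, hD, hM⟩ := ih hrs dc (mv + v)
          refine ⟨d, v + m, ?_, ?_, ?_⟩
          · simpa [faturamentoStep, hs, hmv, hv, add_assoc] using hA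
          · show (r :: rs).foldl (sumStep "DC") (some 0) = some d
            simpa [sumStep, hs, hmv] using hD
          · show (r :: rs).foldl (sumStep "Marvel") (some 0) = some (v + m)
            simp only [List.foldl_cons, sumStep, hs, hmv, Option.bind_some, hv,
              Option.map_some, if_true]
            rw [sumStep_shift]
            simp only [sumBy] at hM
            rw [hM]; simp [add_comm]
        · obtain ⟨d, m, hA, hD, hM⟩ := ih hrs dc mv
          refine ⟨d, m, ?_, ?_, ?_⟩
          · simpa [faturamentoStep, hs, hdc, hmv] using hA
          · show (r :: rs).foldl (sumStep "DC") (some 0) = some d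
            simpa [sumStep, hs, hdc] using hD
          · show (r :: rs).foldl (sumStep "Marvel") (some 0) = some m
            simpa [sumStep, hs, hmv] using hM

-- ===== VERDICT (by name: the statement is the Claim_ definition above) =====
theorem faturamento_spec : Claim_equal_faturamento := by
  intro data _ hpre
  obtain ⟨d, m, hA, hD, hM⟩ := main_invariant (data.drop 1) hpre 0 0
  unfold Spec_faturamento faturamento faturamento_alt
  simp only [hA, hD, hM]
  simp
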